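-- pv_equiv track=rewrite | github.com/RuikunZhou/Resolvent-Type-Operator-Learning | src/basis_functions.py | get_weight_indices
-- ===== SOURCE A (Python) =====
-- import itertools
--
-- def get_weight_indices(monomial_degrees):
--     """
--     Get indices for extracting weights corresponding to linear terms.
--
--     The indices correspond to monomials where one variable has degree 1
--     and all others have degree 0, in the order [x_0, x_1, x_2, ...].
--
--     Parameters:
--     -----------
--     monomial_degrees : list
--         Degree of monomials for each dimension
--
--     Returns:
--     --------
--     indices : list
--         Indices for weight extraction, ordered by dimension
--     """
--     dim = len(monomial_degrees)
--     indices = []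
--
--     # Generate all degree combinations
--     degree_ranges = [range(deg) for deg in monomial_degrees]
--
--     # Find index for each linear term x_d (where x_d has degree 1, others degree 0)
--     for d in range(dim):
--         for idx, degrees in enumerate(itertools.product(*degree_ranges)):
--             # Check if this is the linear term for dimension d
--             is_linear_term = all(
--                 (i == d and deg == 1) or (i != d and deg == 0)
--                 for i, deg in enumerate(degrees)
--             )
--             if is_linear_term:
--                 indices.append(idx)
--                 break
--
--     return indices
-- ===== SOURCE B (Python) =====
-- def get_weight_indices(monomial_degrees):
--     # Linear term x_d exists iff every range is nonempty (all degrees >= 1)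
--     # and degree 1 is available in dimension d (degree >= 2); its product-
--     # enumeration index is the product of the degrees after dimension d.
--     if any(deg <= 0 for deg in monomial_degrees):
--         return []
--     res = []
--     suffix = 1
--     for deg in reversed(monomial_degrees):
--         if deg >= 2:
--             res.append(suffix)
--         suffix *= deg
--     res.reverse()
--     return res
-- ===== Notes on version B (the rewrite author's own statement) =====
-- stated objective: faster
-- what changed: Instead of enumerating the full cartesian product of degree ranges and scanning it once per dimension, B computes each linear-term index directly as the product of the degrees after that dimension in one reverse pass with a running suffix product.
import Mathlib
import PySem

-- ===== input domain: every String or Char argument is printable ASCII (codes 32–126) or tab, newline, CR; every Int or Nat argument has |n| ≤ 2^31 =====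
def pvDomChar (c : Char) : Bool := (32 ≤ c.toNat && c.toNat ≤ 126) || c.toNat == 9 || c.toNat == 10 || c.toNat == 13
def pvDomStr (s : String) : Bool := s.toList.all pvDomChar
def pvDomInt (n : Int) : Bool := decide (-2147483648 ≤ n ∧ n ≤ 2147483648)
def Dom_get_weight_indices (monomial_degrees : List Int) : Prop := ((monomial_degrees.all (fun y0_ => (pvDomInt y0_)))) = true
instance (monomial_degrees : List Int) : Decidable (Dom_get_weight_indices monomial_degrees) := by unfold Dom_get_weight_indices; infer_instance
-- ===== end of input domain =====

-- B replaces A's scan of the full cartesian product with a single reverse pass of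
-- suffix products (each linear index is the product of the degrees after its dimension).

-- ===== PORT A =====
-- itertools.product(*degree_ranges) in lexicographic order
def pvProdLists : List (List Int) → List (List Int)
  | [] => [[]]
  | r :: rs => r.flatMap (fun v => (pvProdLists rs).map (fun t => v :: t))

-- all((i == d and deg == 1) or (i != d and deg == 0) for i, deg in enumerate(degrees))
def pvIsLinear (d : Int) (degrees : List Int) : Bool :=
  (PySem.List.enumerate degrees).all
    (fun p => (p.1 == d && p.2 == 1) || (!(p.1 == d) && p.2 == 0))

-- inner 'for idx, degrees in enumerate(product): if is_linear: append idx; break'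
def pvFirst (d : Int) (idx : Int) : List (List Int) → Option Int
  | [] => none
  | t :: ts => if pvIsLinear d t then some idx else pvFirst d (idx + 1) ts

def get_weight_indices (monomial_degrees : List Int) : List Int :=
  let dim : Int := monomial_degrees.length
  let degree_ranges := monomial_degrees.map (fun deg => PySem.List.pyRange 0 deg 1)
  let prods := pvProdLists degree_ranges
  (PySem.List.pyRange 0 dim 1).foldl
    (fun indices d =>
      match pvFirst d 0 prods with
      | some idx => indices ++ [idx]
      | none => indices) []

-- ===== PORT B =====
def get_weight_indices_alt (monomial_degrees : List Int) : List Int :=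
  if monomial_degrees.any (fun deg => deg ≤ 0) then []
  else
    let st := monomial_degrees.reverse.foldl
      (fun (st : List Int × Int) deg =>
        ((if 2 ≤ deg then st.1 ++ [st.2] else st.1), st.2 * deg)) ([], 1)
    st.1.reverse

-- ===== PRECONDITION & SPEC =====
def Spec_get_weight_indices (monomial_degrees : List Int) (out : List Int) : Prop := out = get_weight_indices_alt monomial_degrees
instance (monomial_degrees : List Int) (out : List Int) : Decidable (Spec_get_weight_indices monomial_degrees out) := by unfold Spec_get_weight_indices; infer_instance

-- ===== CLAIM (what is proved, stated in full; the proofs are below) =====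
def Claim_equal_get_weight_indices : Prop := ∀ (monomial_degrees : List Int), Dom_get_weight_indices monomial_degrees → Spec_get_weight_indices monomial_degrees (get_weight_indices monomial_degrees)

-- ===== LEMMAS AND PROOFS =====

-- generic first-match function used only in proofs
def pvFirstP (p : List Int → Bool) (idx : Int) : List (List Int) → Option Int
  | [] => none
  | t :: ts => if p t then some idx else pvFirstP p (idx + 1) ts

theorem pvFirst_eq_firstP (d : Int) (idx : Int) (l : List (List Int)) :
    pvFirst d idx l = pvFirstP (pvIsLinear d) idx l := by
  induction l generalizing idx with
  | nil => rfl
  | cons t ts ih => simp [pvFirst, pvFirstP, ih]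

theorem pvFirstP_map (p : List Int → Bool) (f : List Int → List Int) (idx : Int)
    (l : List (List Int)) :
    pvFirstP p idx (l.map f) = pvFirstP (fun t => p (f t)) idx l := by
  induction l generalizing idx with
  | nil => rfl
  | cons t ts ih => simp [pvFirstP, ih]

theorem pvFirstP_congr (p q : List Int → Bool) (idx : Int) (l : List (List Int))
    (h : ∀ t ∈ l, p t = q t) :
    pvFirstP p idx l = pvFirstP q idx l := by
  induction l generalizing idx with
  | nil => rfl
  | cons t ts ih =>
    simp only [pvFirstP, h t (by simp)]
    rw [ih]
    intro t' ht'; exact h t' (by simp [ht'])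

theorem pvFirstP_append (p : List Int → Bool) (idx : Int) (xs ys : List (List Int)) :
    pvFirstP p idx (xs ++ ys) =
      match pvFirstP p idx xs with
      | some r => some r
      | none => pvFirstP p (idx + xs.length) ys := by
  induction xs generalizing idx with
  | nil => simp [pvFirstP]
  | cons t ts ih =>
    by_cases h : p t
    · simp [pvFirstP, h]
    · simp only [List.cons_append, pvFirstP, h, if_neg, Bool.false_eq_true, not_false_iff, ih]
      have : idx + 1 + (ts.length : Int) = idx + (t :: ts).length := by
        simp; omega
      rw [this]

theorem pvFirstP_none (p : List Int → Bool) (idx : Int) (l : List (List Int))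
    (h : ∀ t ∈ l, p t = false) :
    pvFirstP p idx l = none := by
  induction l generalizing idx with
  | nil => rfl
  | cons t ts ih =>
    simp [pvFirstP, h t (by simp)]
    exact ih _ (fun t' ht' => h t' (by simp [ht']))

-- shift of the enumeration start by one shifts the target dimension
theorem pvEnum_shift (t : List Int) (s d : Int) :
    ((PySem.List.enumerate t (s + 1)).all
      (fun p => (p.1 == d && p.2 == 1) || (!(p.1 == d) && p.2 == 0))) =
    ((PySem.List.enumerate t s).all
      (fun p => (p.1 == (d - 1) && p.2 == 1) || (!(p.1 == (d - 1)) && p.2 == 0))) := by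
  induction t generalizing s with
  | nil => simp [PySem.List.enumerate_nil]
  | cons x xs ih =>
    rw [PySem.List.enumerate_cons, PySem.List.enumerate_cons, List.all_cons, List.all_cons,
      ih (s + 1)]
    have hb : ((s + 1 : Int) == d) = ((s : Int) == (d - 1)) := by
      by_cases h : s + 1 = d
      · have h2 : s = d - 1 := by omega
        simp [h2]
      · have h2 : ¬ s = d - 1 := by omega
        simp [h, h2]
    rw [hb]

theorem pvIsLinear_cons (d v : Int) (t : List Int) :
    pvIsLinear d (v :: t) =
      ((((0 : Int) == d && v == 1) || (!((0 : Int) == d) && v == 0)) && pvIsLinear (d - 1) t) := by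
  unfold pvIsLinear
  rw [PySem.List.enumerate_cons, List.all_cons, pvEnum_shift t 0 d]

theorem pvIsLinear_neg (d : Int) (t : List Int) (hd : d < 0) :
    pvIsLinear d t = t.all (fun x => x == 0) := by
  induction t generalizing d with
  | nil => rfl
  | cons x xs ih =>
    rw [pvIsLinear_cons, ih (d - 1) (by omega)]
    have h0 : ((0 : Int) == d) = false := by simp; omega
    simp [h0]

-- the head of the product list is the all-zero tuple when every degree is positive
theorem pvProd_head (rs : List Int) (h : ∀ x ∈ rs, 1 ≤ x) :
    ∃ ts, pvProdLists (rs.map (fun deg => PySem.List.pyRange 0 deg 1)) =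
      (rs.map (fun _ => (0 : Int))) :: ts ∧ (rs.map (fun _ => (0 : Int))).all (fun x => x == 0) := by
  induction rs with
  | nil => exact ⟨[], rfl, rfl⟩
  | cons a rest ih =>
    obtain ⟨ts, hts, hz⟩ := ih (fun x hx => h x (by simp [hx]))
    have ha : (0 : Int) < a := by have := h a (by simp); omega
    rw [List.map_cons, pvProdLists, PySem.List.pyRange_one_cons ha, List.flatMap_cons, hts,
      List.map_cons, List.cons_append]
    exact ⟨_, rfl, by simp⟩

theorem pvProd_length (rs : List Int) (h : ∀ x ∈ rs, 1 ≤ x) :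
    ((pvProdLists (rs.map (fun deg => PySem.List.pyRange 0 deg 1))).length : Int) = rs.prod := by
  induction rs with
  | nil => simp [pvProdLists]
  | cons a rest ih =>
    have ha : (1 : Int) ≤ a := h a (by simp)
    rw [List.map_cons, pvProdLists, List.length_flatMap]
    simp only [List.length_map]
    rw [List.map_const', List.sum_replicate, smul_eq_mul, PySem.List.length_pyRange_one,
      sub_zero]
    push_cast
    rw [Int.toNat_of_nonneg (by omega), ih (fun x hx => h x (by simp [hx])), List.prod_cons]

theorem pvProd_nil_of_nonpos (m : List Int) (h : ∃ x ∈ m, x ≤ 0) :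
    pvProdLists (m.map (fun deg => PySem.List.pyRange 0 deg 1)) = [] := by
  induction m with
  | nil => simp at h
  | cons a rest ih =>
    rw [List.map_cons, pvProdLists]
    obtain ⟨x, hx, hx0⟩ := h
    rcases List.mem_cons.mp hx with rfl | hx'
    · rw [PySem.List.pyRange_one_eq_nil (by omega)]; rfl
    · rw [ih ⟨x, hx', hx0⟩]
      simp

-- the core lemma: the inner search returns the suffix product, directly
theorem pvKey (m : List Int) (d : Nat) (hall : ∀ x ∈ m, 1 ≤ x) (hd : d < m.length) :
    pvFirstP (pvIsLinear (d : Int)) 0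
        (pvProdLists (m.map (fun deg => PySem.List.pyRange 0 deg 1))) =
      if 2 ≤ m.getD d 0 then some ((m.drop (d + 1)).prod) else none := by
  induction m generalizing d with
  | nil => simp at hd
  | cons a rest ih =>
    have ha : (1 : Int) ≤ a := hall a (by simp)
    have hrest : ∀ x ∈ rest, 1 ≤ x := fun x hx => hall x (by simp [hx])
    rw [List.map_cons, pvProdLists]
    cases d with
    | zero =>
      simp only [Nat.cast_zero]
      -- head condition for block v: pvIsLinear 0 (v :: t) = (v == 1) && allZero t
      have hcons : ∀ v t, pvIsLinear 0 (v :: t) = ((v == 1) && t.all (fun x => x == 0)) := by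
        intro v t
        rw [pvIsLinear_cons, pvIsLinear_neg (0 - 1) t (by norm_num)]
        simp
      rw [PySem.List.pyRange_one_cons (by omega), List.flatMap_cons, pvFirstP_append,
        pvFirstP_map]
      have hblock0 : pvFirstP (fun t => pvIsLinear 0 ((0 : Int) :: t)) 0
          (pvProdLists (rest.map (fun deg => PySem.List.pyRange 0 deg 1))) = none := by
        apply pvFirstP_none
        intro t _
        rw [hcons]; simp
      rw [hblock0]
      simp only [zero_add, List.length_map]
      by_cases h2 : (2 : Int) ≤ a
      · rw [PySem.List.pyRange_one_cons (by omega : (1:Int) < a), List.flatMap_cons,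
          pvFirstP_append, pvFirstP_map]
        obtain ⟨ts, hts, hz⟩ := pvProd_head rest hrest
        have hfind : pvFirstP (fun t => pvIsLinear 0 ((1 : Int) :: t))
            (((pvProdLists (rest.map (fun deg => PySem.List.pyRange 0 deg 1))).length : Int))
            (pvProdLists (rest.map (fun deg => PySem.List.pyRange 0 deg 1))) =
            some ((pvProdLists (rest.map (fun deg => PySem.List.pyRange 0 deg 1))).length : Int) := by
          rw [hts, pvFirstP, hcons]
          simp
        rw [hfind]
        simp [h2, pvProd_length rest hrest]
      · have h1 : a = 1 := by omega
        subst h1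
        rw [PySem.List.pyRange_one_eq_nil (by omega)]
        simp [pvFirstP]
    | succ d' =>
      have hdcast : ((d' + 1 : Nat) : Int) ≠ 0 := by push_cast; omega
      have hcons : ∀ v t, pvIsLinear ((d' + 1 : Nat) : Int) (v :: t) =
          ((v == 0) && pvIsLinear (d' : Int) t) := by
        intro v t
        rw [pvIsLinear_cons]
        have hsub : ((d' + 1 : Nat) : Int) - 1 = (d' : Int) := by push_cast; omega
        rw [hsub]
        have h0 : ((0 : Int) == ((d' + 1 : Nat) : Int)) = false := by
          simp only [beq_eq_false_iff_ne]
          exact fun h => hdcast h.symm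
        rw [h0]
        simp
      rw [PySem.List.pyRange_one_cons (by omega), List.flatMap_cons, pvFirstP_append,
        pvFirstP_map]
      have hblock0 : pvFirstP (fun t => pvIsLinear ((d' + 1 : Nat) : Int) ((0 : Int) :: t)) 0
          (pvProdLists (rest.map (fun deg => PySem.List.pyRange 0 deg 1))) =
          pvFirstP (pvIsLinear (d' : Int)) 0
            (pvProdLists (rest.map (fun deg => PySem.List.pyRange 0 deg 1))) := by
        apply pvFirstP_congr
        intro t _
        rw [hcons]; simp
      rw [hblock0, ih d' hrest (by simpa using hd)]
      simp only [zero_add, List.getD_cons_succ, List.drop_succ_cons]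
      have hrestblocks : pvFirstP (pvIsLinear ((d' + 1 : Nat) : Int))
          ((((pvProdLists (rest.map (fun deg => PySem.List.pyRange 0 deg 1))).map
            (fun t => (0 : Int) :: t)).length : Int))
          ((PySem.List.pyRange 1 a 1).flatMap
            (fun v => (pvProdLists (rest.map (fun deg => PySem.List.pyRange 0 deg 1))).map
              (fun t => v :: t))) = none := by
        apply pvFirstP_none
        intro t ht
        rw [List.mem_flatMap] at ht
        obtain ⟨v, hv, ht⟩ := ht
        rw [List.mem_map] at ht
        obtain ⟨t', _, rfl⟩ := ht
        rw [hcons]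
        have hv1 : (1 : Int) ≤ v := (PySem.List.mem_pyRange_one.mp hv).1
        simp; omega
      by_cases h2 : (2 : Int) ≤ rest.getD d' 0
      · rw [if_pos h2]
      · simp only [if_neg h2]
        rw [hrestblocks]

-- fold-append as filterMap
theorem pvFold_filterMap (g : Nat → Option Int) (l : List Nat) (acc : List Int) :
    l.foldl (fun indices d =>
      match g d with
      | some idx => indices ++ [idx]
      | none => indices) acc = acc ++ l.filterMap g := by
  induction l generalizing acc with
  | nil => simp
  | cons x xs ih =>
    simp only [List.foldl_cons, List.filterMap_cons]
    cases hg : g x with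
    | none => rw [ih]
    | some v => rw [ih]; simp

-- B's value as a structural recursion on the list
def pvSpecL : List Int → List Int
  | [] => []
  | a :: rest => (if 2 ≤ a then [rest.prod] else []) ++ pvSpecL rest

theorem pvAlt_foldr (m : List Int) :
    m.foldr (fun deg (st : List Int × Int) =>
        ((if 2 ≤ deg then st.1 ++ [st.2] else st.1), st.2 * deg)) ([], 1) =
      ((pvSpecL m).reverse, m.prod) := by
  induction m with
  | nil => simp [pvSpecL]
  | cons a rest ih =>
    rw [List.foldr_cons, ih]
    simp only [pvSpecL, List.prod_cons]
    by_cases h : (2 : Int) ≤ a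
    · simp [h, mul_comm]
    · simp [h, mul_comm]

theorem pvAlt_eq (m : List Int) :
    get_weight_indices_alt m = if m.any (fun deg => deg ≤ 0) then [] else pvSpecL m := by
  unfold get_weight_indices_alt
  by_cases h : m.any (fun deg => deg ≤ 0)
  · simp [h]
  · simp only [h, if_neg, Bool.false_eq_true, not_false_iff]
    rw [List.foldl_reverse, pvAlt_foldr]
    simp

theorem pvSpecL_eq_filterMap (m : List Int) :
    pvSpecL m = (List.range m.length).filterMap
      (fun k => if 2 ≤ m.getD k 0 then some ((m.drop (k + 1)).prod) else none) := by
  induction m with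
  | nil => simp [pvSpecL]
  | cons a rest ih =>
    rw [pvSpecL, ih]
    rw [List.length_cons, List.range_succ_eq_map, List.filterMap_cons, List.filterMap_map]
    simp only [List.getD_cons_zero, List.getD_cons_succ, List.drop_succ_cons, Function.comp]
    by_cases h : (2 : Int) ≤ a
    · simp only [if_pos h]
      rfl
    · simp only [if_neg h]
      rfl

-- A as the same filterMap
theorem pvA_eq (m : List Int) :
    get_weight_indices m = (List.range m.length).filterMap
      (fun (k : Nat) => pvFirst (k : Int) 0
        (pvProdLists (m.map (fun deg => PySem.List.pyRange 0 deg 1)))) := by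
  simp only [get_weight_indices]
  rw [PySem.List.pyRange_one]
  simp only [sub_zero, Int.toNat_natCast, List.foldl_map, zero_add]
  rw [pvFold_filterMap (fun k => pvFirst (k : Int) 0
    (pvProdLists (m.map (fun deg => PySem.List.pyRange 0 deg 1))))]
  simp only [List.nil_append]

theorem pv_main (m : List Int) : get_weight_indices m = get_weight_indices_alt m := by
  rw [pvA_eq, pvAlt_eq]
  by_cases h : m.any (fun deg => deg ≤ 0)
  · simp only [if_pos h]
    rw [List.any_eq_true] at h
    obtain ⟨x, hx, hx0⟩ := h
    rw [pvProd_nil_of_nonpos m ⟨x, hx, by simpa using hx0⟩]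
    apply List.filterMap_eq_nil_iff.mpr
    intro k _
    rfl
  · simp only [if_neg h]
    have hall : ∀ x ∈ m, 1 ≤ x := by
      intro x hx
      by_contra hc
      exact h (List.any_eq_true.mpr ⟨x, hx, by simp; omega⟩)
    rw [pvSpecL_eq_filterMap]
    apply List.filterMap_congr
    intro k hk
    rw [List.mem_range] at hk
    rw [pvFirst_eq_firstP, pvKey m k hall hk]

-- ===== VERDICT (by name: the statement is the Claim_ definition above) =====
theorem get_weight_indices_spec : Claim_equal_get_weight_indices := by
  intro m _
  unfold Spec_get_weight_indices
  exact pv_main m
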